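-- pv_equiv track=rewrite | github.com/thunlp/MetaAdaptRank | preprocess/utils/.ipynb_checkpoints/cv_spliter-checkpoint.py | get_qid2doc_grades
-- ===== SOURCE A (Python) =====
-- def get_qid2doc_grades(qid2item, valid_qid2did, label_list):
--     """
--     qid2label2docid
--     We reset label <=0 to label=0.
--     """
--     assert qid2item.keys() == valid_qid2did.keys()
--
--     qid2grades = {}
--     for qid in valid_qid2did:
--         grades = {item:set() for item in label_list}
--         valid_dids = valid_qid2did[qid]
--
--         for did in valid_dids:
--             # non this doc record in qrels
--             if did not in qid2item[qid]:
--                 grades[label_list[-1]].add(did)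
--             else:
--                 label = qid2item[qid][did]
--                 grades[label].add(did)
--         qid2grades[qid] = grades
--     return qid2grades
-- ===== SOURCE B (Python) =====
-- def get_qid2doc_grades(qid2item, valid_qid2did, label_list):
--     """Label-major rewrite: one bucket comprehension per label instead of
--     dispatching each doc id; the last label's bucket absorbs unknown docs."""
--     assert qid2item.keys() == valid_qid2did.keys()
--     last = len(label_list) - 1
--     qid2grades = {}
--     for qid, valid_dids in valid_qid2did.items():
--         qrels = qid2item[qid]
--         grades = {}
--         for i, label in enumerate(label_list):
--             default = label if i == last else None
--             grades[label] = {did for did in valid_dids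
--                              if qrels.get(did, default) == label}
--         qid2grades[qid] = grades
--     return qid2grades
-- ===== Notes on version B (the rewrite author's own statement) =====
-- stated objective: alternative
-- what changed: B is label-major: instead of A's single pass over valid_dids that dispatches each doc id into pre-built per-label set buckets, B builds each label's bucket wholesale with one set comprehension over valid_dids per (index, label) pair, letting the last index absorb doc ids absent from the qrels and dict overwrite handle duplicate labels.
import Mathlib
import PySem

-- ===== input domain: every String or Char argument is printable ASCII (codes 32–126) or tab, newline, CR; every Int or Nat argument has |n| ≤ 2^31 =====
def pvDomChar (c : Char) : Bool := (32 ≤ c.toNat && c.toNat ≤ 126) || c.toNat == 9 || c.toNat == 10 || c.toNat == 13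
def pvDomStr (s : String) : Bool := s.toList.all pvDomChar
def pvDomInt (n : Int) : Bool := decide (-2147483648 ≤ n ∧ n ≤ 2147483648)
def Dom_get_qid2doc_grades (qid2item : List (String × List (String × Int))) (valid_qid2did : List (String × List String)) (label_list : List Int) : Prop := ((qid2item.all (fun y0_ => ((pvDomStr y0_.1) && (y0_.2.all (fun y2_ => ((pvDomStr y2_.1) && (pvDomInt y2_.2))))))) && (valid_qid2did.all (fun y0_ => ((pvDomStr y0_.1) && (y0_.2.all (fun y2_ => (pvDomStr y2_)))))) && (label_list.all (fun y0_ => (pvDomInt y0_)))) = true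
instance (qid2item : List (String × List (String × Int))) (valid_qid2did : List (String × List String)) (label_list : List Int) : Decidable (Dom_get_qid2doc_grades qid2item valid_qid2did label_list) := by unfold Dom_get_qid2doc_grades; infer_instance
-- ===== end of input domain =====

-- B is an alternative decomposition (label-major bucket comprehensions instead of A's doc-major
-- dispatch into pre-built buckets); proved to return A's value on every input where the Python A returns.

-- ===== PORT A =====
-- Python: grades[l].add(did); KeyError when l is not a key — excluded by Pre_; the port leaves g unchanged there.
def addGrade (g : PySem.Dict Int (List String)) (l : Int) (did : String) : PySem.Dict Int (List String) :=
  if g.contains l then g.insert l (PySem.Set.add (g.getD l []) did) else g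

-- Python: grades = {item: set() for item in label_list}
def initGrades (label_list : List Int) : PySem.Dict Int (List String) :=
  label_list.foldl (fun g l => g.insert l PySem.Set.empty) PySem.Dict.empty

-- Python: the inner 'for did in valid_dids' loop; label_list[-1] is pyGetD label_list (-1)
-- (IndexError on an empty label_list is excluded by Pre_; the default 0 then hits an empty dict).
def gradesOfA (qrels : PySem.Dict String Int) (label_list : List Int) (dids : List String) : PySem.Dict Int (List String) :=
  dids.foldl (fun g did =>
    match qrels.get? did with
    | none => addGrade g (PySem.List.pyGetD label_list (-1) 0) did
    | some l => addGrade g l did) (initGrades label_list)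

-- Python A: the assert (AssertionError excluded by Pre_), then the loop over valid_qid2did building
-- qid2grades; qid2item[qid] and valid_qid2did[qid] are dict lookups (total form with default []).
def get_qid2doc_grades (qid2item : List (String × List (String × Int))) (valid_qid2did : List (String × List String)) (label_list : List Int) : List (String × List (Int × List String)) :=
  (valid_qid2did.foldl (fun acc p =>
      acc.insert p.1 ((gradesOfA (PySem.Dict.mk ((PySem.Dict.mk qid2item).getD p.1 []))
        label_list ((PySem.Dict.mk valid_qid2did).getD p.1 [])).items))
    PySem.Dict.empty).items

-- ===== PORT B =====
-- Python B's bucket comprehension {did for did in valid_dids if qrels.get(did, default) == label}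
-- at index i, where default = label iff i is the last index and None otherwise (None == int is False).
def bucketB (qrels : PySem.Dict String Int) (dids : List String) (last : Int) (i : Int) (l : Int) : List String :=
  PySem.Set.ofList (dids.filter (fun did =>
    match qrels.get? did with
    | some x => x == l
    | none => i == last))

-- Python B: for i, label in enumerate(label_list): grades[label] = bucket
def gradesOfB (qrels : PySem.Dict String Int) (label_list : List Int) (dids : List String) : PySem.Dict Int (List String) :=
  (PySem.List.enumerate label_list).foldl
    (fun g p => g.insert p.2 (bucketB qrels dids ((label_list.length : Int) - 1) p.1 p.2))
    PySem.Dict.empty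

def get_qid2doc_grades_alt (qid2item : List (String × List (String × Int))) (valid_qid2did : List (String × List String)) (label_list : List Int) : List (String × List (Int × List String)) :=
  (valid_qid2did.foldl (fun acc p =>
      acc.insert p.1 ((gradesOfB (PySem.Dict.mk ((PySem.Dict.mk qid2item).getD p.1 []))
        label_list p.2).items))
    PySem.Dict.empty).items

-- ===== PRECONDITION & SPEC =====
-- ok for one valid did: its qrels label must be a declared grade; an unknown did needs label_list[-1].
def preLabelOk (o : Option Int) (label_list : List Int) : Bool :=
  match o with
  | none => !label_list.isEmpty
  | some l => label_list.contains l

-- Pre_ excludes exactly the inputs where the Python A raises: AssertionError (key sets differ),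
-- KeyError (a valid did whose qrels label is not in label_list), IndexError (empty label_list with
-- an unknown valid did); plus association lists with duplicate qids in valid_qid2did, which no
-- Python dict input can produce.
def Pre_get_qid2doc_grades (qid2item : List (String × List (String × Int))) (valid_qid2did : List (String × List String)) (label_list : List Int) : Prop :=
  (valid_qid2did.map Prod.fst).Nodup ∧
  PySem.Set.equal (PySem.Set.ofList (qid2item.map Prod.fst)) (PySem.Set.ofList (valid_qid2did.map Prod.fst)) = true ∧
  valid_qid2did.all (fun p => p.2.all (fun did =>
    preLabelOk ((PySem.Dict.mk ((PySem.Dict.mk qid2item).getD p.1 [])).get? did) label_list)) = true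

instance (qid2item : List (String × List (String × Int))) (valid_qid2did : List (String × List String)) (label_list : List Int) : Decidable (Pre_get_qid2doc_grades qid2item valid_qid2did label_list) := by unfold Pre_get_qid2doc_grades; infer_instance

def pvWitness_get_qid2doc_grades : (List (String × List (String × Int))) × (List (String × List String)) × List Int :=
  ([("q1", [("d1", 1), ("d2", 0)]), ("q2", [])], [("q1", ["d1", "d3"]), ("q2", ["d4"])], [1, 0])

def Spec_get_qid2doc_grades (qid2item : List (String × List (String × Int))) (valid_qid2did : List (String × List String)) (label_list : List Int) (out : List (String × List (Int × List String))) : Prop := out = get_qid2doc_grades_alt qid2item valid_qid2did label_list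
instance (qid2item : List (String × List (String × Int))) (valid_qid2did : List (String × List String)) (label_list : List Int) (out : List (String × List (Int × List String))) : Decidable (Spec_get_qid2doc_grades qid2item valid_qid2did label_list out) := by unfold Spec_get_qid2doc_grades; infer_instance

-- ===== CLAIM (what is proved, stated in full; the proofs are below) =====
def Claim_equal_get_qid2doc_grades : Prop := ∀ (qid2item : List (String × List (String × Int))) (valid_qid2did : List (String × List String)) (label_list : List Int), Dom_get_qid2doc_grades qid2item valid_qid2did label_list → Pre_get_qid2doc_grades qid2item valid_qid2did label_list → Spec_get_qid2doc_grades qid2item valid_qid2did label_list (get_qid2doc_grades qid2item valid_qid2did label_list)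

-- ===== LEMMAS AND PROOFS =====

-- the effective label A files a did under
def effLabel (qrels : PySem.Dict String Int) (label_list : List Int) (did : String) : Int :=
  match qrels.get? did with
  | none => PySem.List.pyGetD label_list (-1) 0
  | some l => l

theorem stepA_eq (qrels : PySem.Dict String Int) (label_list : List Int) (g : PySem.Dict Int (List String)) (did : String) :
    (match qrels.get? did with
     | none => addGrade g (PySem.List.pyGetD label_list (-1) 0) did
     | some l => addGrade g l did) = addGrade g (effLabel qrels label_list did) did := by
  unfold effLabel; cases qrels.get? did <;> rfl

theorem keys_addGrade (g : PySem.Dict Int (List String)) (l : Int) (d : String) :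
    (addGrade g l d).keys = g.keys := by
  unfold addGrade; split
  · rename_i h; exact PySem.Dict.keys_insert_of_contains _ _ h
  · rfl

theorem foldA_getD (qrels : PySem.Dict String Int) (label_list : List Int) :
    ∀ (dids : List String) (g : PySem.Dict Int (List String))
      (_ : ∀ l : Int, g.contains l = decide (l ∈ label_list)) (k : Int) (_ : k ∈ label_list),
      (dids.foldl (fun g did => addGrade g (effLabel qrels label_list did) did) g).getD k []
        = (dids.filter (fun did => effLabel qrels label_list did == k)).foldl PySem.Set.add (g.getD k [])
  | [], _, _, _, _ => rfl
  | did :: dids, g, hc, k, hk => by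
      simp only [List.foldl_cons, List.filter_cons]
      by_cases hl : effLabel qrels label_list did ∈ label_list
      · have hcl : g.contains (effLabel qrels label_list did) = true := by
          rw [hc]; simpa
        have hins : addGrade g (effLabel qrels label_list did) did
            = g.insert (effLabel qrels label_list did)
                (PySem.Set.add (g.getD (effLabel qrels label_list did) []) did) := by
          unfold addGrade; rw [hcl]; rfl
        rw [hins]
        rw [foldA_getD qrels label_list dids _ (by
          intro m
          rw [PySem.Dict.contains_insert, hc m]
          by_cases hm : m = effLabel qrels label_list did
          · subst hm; simp [hl]
          · simp [hm]) k hk]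
        rw [PySem.Dict.getD_insert]
        by_cases hkl : effLabel qrels label_list did = k
        · subst hkl; simp
        · have hbf : (effLabel qrels label_list did == k) = false := by simp [hkl]
          simp [hbf, Ne.symm hkl]
      · have hcl : g.contains (effLabel qrels label_list did) = false := by
          rw [hc]; simp [hl]
        have hng : addGrade g (effLabel qrels label_list did) did = g := by
          unfold addGrade; simp [hcl]
        have hlk : (effLabel qrels label_list did == k) = false := by
          simp; intro h; exact hl (h ▸ hk)
        rw [hng, hlk]
        exact foldA_getD qrels label_list dids g hc k hk

theorem keys_initGrades (label_list : List Int) :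
    (initGrades label_list).keys = PySem.List.dedup label_list := by
  unfold initGrades
  rw [PySem.Dict.keys_foldl_insert label_list (fun _ _ => PySem.Set.empty) PySem.Dict.empty]
  simp [PySem.Set.update, PySem.Set.ofList]

theorem getD_init_aux (k : Int) :
    ∀ (ls : List Int) (g : PySem.Dict Int (List String)) (_ : ∀ m, g.getD m ([] : List String) = []),
      (ls.foldl (fun g l => g.insert l PySem.Set.empty) g).getD k [] = []
  | [], g, h0 => h0 k
  | l :: ls, g, h0 => by
      simp only [List.foldl_cons]
      exact getD_init_aux k ls _ (by
        intro m; rw [PySem.Dict.getD_insert]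
        split
        · rfl
        · exact h0 m)

theorem getD_initGrades (label_list : List Int) (k : Int) :
    (initGrades label_list).getD k [] = [] := by
  unfold initGrades
  exact getD_init_aux k label_list PySem.Dict.empty (by intro m; simp)

theorem contains_initGrades (label_list : List Int) (l : Int) :
    (initGrades label_list).contains l = decide (l ∈ label_list) := by
  by_cases h : l ∈ label_list
  · simp only [h, decide_true]
    rw [PySem.Dict.contains_iff_mem_keys, keys_initGrades]
    rwa [PySem.List.mem_dedup]
  · simp only [h, decide_false]
    rw [← Bool.not_eq_true, PySem.Dict.contains_iff_mem_keys, keys_initGrades, PySem.List.mem_dedup]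
    exact h

theorem keys_gradesOfA (qrels : PySem.Dict String Int) (label_list : List Int) (dids : List String) :
    (gradesOfA qrels label_list dids).keys = PySem.List.dedup label_list := by
  unfold gradesOfA
  suffices h : ∀ (ds : List String) (g : PySem.Dict Int (List String)),
      (ds.foldl (fun g did =>
        match qrels.get? did with
        | none => addGrade g (PySem.List.pyGetD label_list (-1) 0) did
        | some l => addGrade g l did) g).keys = g.keys by
    rw [h]; exact keys_initGrades label_list
  intro ds
  induction ds with
  | nil => intro g; rfl
  | cons d ds ih =>
      intro g
      simp only [List.foldl_cons]
      rw [ih, stepA_eq, keys_addGrade]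

theorem getD_gradesOfA (qrels : PySem.Dict String Int) (label_list : List Int) (dids : List String)
    (k : Int) (hk : k ∈ label_list) :
    (gradesOfA qrels label_list dids).getD k []
      = PySem.Set.ofList (dids.filter (fun did => effLabel qrels label_list did == k)) := by
  unfold gradesOfA
  have hfold : (dids.foldl (fun g did =>
      match qrels.get? did with
      | none => addGrade g (PySem.List.pyGetD label_list (-1) 0) did
      | some l => addGrade g l did) (initGrades label_list))
      = dids.foldl (fun g did => addGrade g (effLabel qrels label_list did) did) (initGrades label_list) := by
    apply PySem.List.foldl_congr_mem
    intro g did _; exact stepA_eq qrels label_list g did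
  rw [hfold, foldA_getD qrels label_list dids (initGrades label_list) (contains_initGrades label_list) k hk,
      getD_initGrades, PySem.Set.ofList_eq_foldl]

-- ===== B-side lemmas =====

-- index of the LAST occurrence of k in ls (meaningful when k ∈ ls)
def lastIdx (k : Int) : List Int → Nat
  | [] => 0
  | _ :: ls => if k ∈ ls then lastIdx k ls + 1 else 0

theorem foldB_getD (qrels : PySem.Dict String Int) (dids : List String) (last : Int) (k : Int) :
    ∀ (ls : List Int) (s : Int) (g : PySem.Dict Int (List String)),
      ((PySem.List.enumerate ls s).foldl (fun g p => g.insert p.2 (bucketB qrels dids last p.1 p.2)) g).getD k []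
        = if k ∈ ls then bucketB qrels dids last (s + (lastIdx k ls : Int)) k else g.getD k []
  | [], s, g => by simp [PySem.List.enumerate_nil]
  | l :: ls, s, g => by
      rw [PySem.List.enumerate_cons, List.foldl_cons]
      rw [foldB_getD qrels dids last k ls (s + 1) _]
      by_cases hls : k ∈ ls
      · have hmem : k ∈ l :: ls := List.mem_cons_of_mem _ hls
        have hidx : lastIdx k (l :: ls) = lastIdx k ls + 1 := by simp [lastIdx, hls]
        simp only [hls, if_true, hmem, if_true, hidx]
        rw [show ((lastIdx k ls + 1 : Nat) : Int) = (lastIdx k ls : Int) + 1 from by push_cast; ring,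
            show s + 1 + (lastIdx k ls : Int) = s + ((lastIdx k ls : Int) + 1) from by ring]
      · simp only [hls, if_false]
        by_cases hkl : k = l
        · subst hkl
          have hmem : k ∈ k :: ls := List.mem_cons_self
          have hidx : lastIdx k (k :: ls) = 0 := by simp [lastIdx, hls]
          simp only [hmem, if_true, hidx, PySem.Dict.getD_insert]
          simp
        · have hmem : k ∉ l :: ls := by simp [hkl, hls]
          simp only [hmem, if_false, PySem.Dict.getD_insert, hkl, if_false]

theorem keys_gradesOfB (qrels : PySem.Dict String Int) (label_list : List Int) (dids : List String) :
    (gradesOfB qrels label_list dids).keys = PySem.List.dedup label_list := by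
  unfold gradesOfB
  rw [PySem.Dict.keys_foldl_insert_key (PySem.List.enumerate label_list)
      (fun p => p.2) _ PySem.Dict.empty]
  simp [PySem.List.map_snd_enumerate, PySem.Set.update, PySem.Set.ofList]

theorem lastIdx_eq_iff (k : Int) :
    ∀ (ls : List Int), k ∈ ls → ((lastIdx k ls = ls.length - 1) ↔ ls.getLast? = some k)
  | [], h => by simp at h
  | [l], h => by
      simp only [List.mem_singleton] at h
      subst h
      simp [lastIdx]
  | l :: l2 :: ls, h => by
      rw [List.getLast?_cons_cons]
      by_cases hls : k ∈ l2 :: ls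
      · have hidx : lastIdx k (l :: l2 :: ls) = lastIdx k (l2 :: ls) + 1 := by
          simp [lastIdx, hls]
        have hih := lastIdx_eq_iff k (l2 :: ls) hls
        rw [hidx, ← hih]
        simp only [List.length_cons]
        omega
      · have hk : k = l := by
          rcases List.mem_cons.mp h with h' | h'
          · exact h'
          · exact absurd h' hls
        have hidx : lastIdx k (l :: l2 :: ls) = 0 := by simp [lastIdx, hls]
        rw [hidx]
        constructor
        · intro h0; simp at h0
        · intro hg
          exact absurd (List.mem_of_getLast? hg) hls

theorem getD_gradesOfB (qrels : PySem.Dict String Int) (label_list : List Int) (dids : List String)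
    (k : Int) (hk : k ∈ label_list) :
    (gradesOfB qrels label_list dids).getD k []
      = PySem.Set.ofList (dids.filter (fun did => effLabel qrels label_list did == k)) := by
  unfold gradesOfB
  rw [foldB_getD qrels dids ((label_list.length : Int) - 1) k label_list 0 PySem.Dict.empty]
  simp only [hk, if_true]
  unfold bucketB
  congr 1
  apply List.filter_congr
  intro did _
  cases hq : qrels.get? did with
  | some x => simp [effLabel, hq]
  | none =>
      simp only [effLabel, hq]
      have hne : label_list ≠ [] := List.ne_nil_of_mem hk
      rw [PySem.List.pyGetD_neg_one _ _ hne]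
      have hiff := lastIdx_eq_iff k label_list hk
      have hpos : 0 < label_list.length := List.length_pos_of_ne_nil hne
      by_cases hg : label_list.getLast hne = k
      · have hsome : label_list.getLast? = some k := by
          rw [List.getLast?_eq_some_getLast hne, hg]
        have hidx : lastIdx k label_list = label_list.length - 1 := hiff.mpr hsome
        have : (0 : Int) + (lastIdx k label_list : Int) = (label_list.length : Int) - 1 := by
          omega
        simp [this, hg]
      · have hsome : label_list.getLast? ≠ some k := by
          rw [List.getLast?_eq_some_getLast hne]
          simpa using hg
        have hidx : lastIdx k label_list ≠ label_list.length - 1 := fun h => hsome (hiff.mp h)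
        have hI : ((0 : Int) + (lastIdx k label_list : Int) == (label_list.length : Int) - 1) = false := by
          simp only [beq_eq_false_iff_ne, ne_eq]
          intro h
          apply hidx
          omega
        have hG : (label_list.getLast hne == k) = false := by simpa using hg
        rw [hI, hG]

theorem grades_eq (qrels : PySem.Dict String Int) (label_list : List Int) (dids : List String) :
    gradesOfA qrels label_list dids = gradesOfB qrels label_list dids := by
  apply PySem.Dict.ext
  rw [PySem.Dict.items_eq_map_keys _ (by rw [keys_gradesOfA]; exact PySem.List.nodup_dedup _) ([] : List String),
      PySem.Dict.items_eq_map_keys _ (by rw [keys_gradesOfB]; exact PySem.List.nodup_dedup _) ([] : List String),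
      keys_gradesOfA, keys_gradesOfB]
  apply List.map_congr_left
  intro k hkd
  have hk : k ∈ label_list := (PySem.List.mem_dedup label_list k).mp hkd
  rw [getD_gradesOfA qrels label_list dids k hk, getD_gradesOfB qrels label_list dids k hk]

-- ===== VERDICT (by name: the statement is the Claim_ definition above) =====
theorem get_qid2doc_grades_spec : Claim_equal_get_qid2doc_grades := by
  intro qid2item valid_qid2did label_list _ hpre
  obtain ⟨hnd, -, -⟩ := hpre
  unfold Spec_get_qid2doc_grades get_qid2doc_grades get_qid2doc_grades_alt
  congr 1
  apply PySem.List.foldl_congr_mem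
  intro acc p hp
  have hdids : (PySem.Dict.mk valid_qid2did).getD p.1 [] = p.2 := by
    apply PySem.Dict.getD_of_mem_items (d := PySem.Dict.mk valid_qid2did) (k := p.1) (v := p.2)
    · simpa using hp
    · rw [PySem.Dict.keys_mk]; exact hnd
  rw [hdids, grades_eq]
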